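-- pv_equiv track=rewrite | github.com/ChopinNo3Op9/Coding-Challenge | max consecutive words.py | max_consecutive_positions_with_swaps
-- ===== SOURCE A (Python) =====
-- def max_consecutive_positions_with_swaps(s, m):
--
--     res = 1
--
--     for c in range(ord('a'), ord('z') + 1):
--         c = chr(c)
--         pos = []
--         for i in range(len(s)):
--             if c == s[i]:
--                 pos.append(i)  # searches for all positions in the input string where that letter appears and stores these positions in the pos list.
--         if len(pos) < 2:
--             continue
--
--         ans = 1
--         dp = [[0 for _ in range(len(pos))] for _ in range(len(pos))]   # dynamic programming
--         for length in range(2, len(pos) + 1):   # DP process calculates the maximum consecutive positions for different lengths of contiguous letters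
--             for i in range(len(pos) - length + 1):
--                 j = i + length - 1
--                 dp[i][j] = dp[i + 1][j - 1] + pos[j] - pos[i] + 1 - length
--                 if dp[i][j] <= m:
--                     ans = length
--
--         res = max(res, ans)
--
--     return res
-- ===== SOURCE B (Python) =====
-- def max_consecutive_positions_with_swaps(s, m):
--     res = 1
--     for c in "abcdefghijklmnopqrstuvwxyz":
--         pos = [i for i, x in enumerate(s) if x == c]
--         k = len(pos)
--         # q normalizes positions so the gather cost of a window is a difference
--         # of two half-window prefix sums (no DP table needed)
--         q = [p - t for t, p in enumerate(pos)]
--         P = [0] * (k + 1)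
--         for t in range(k):
--             P[t + 1] = P[t] + q[t]
--         best = 1
--         for i in range(k):
--             for j in range(i + 1, k):
--                 h = (j - i + 1) // 2
--                 cost = (P[j + 1] - P[j + 1 - h]) - (P[i + h] - P[i])
--                 if cost <= m and j - i + 1 > best:
--                     best = j - i + 1
--         res = max(res, best)
--     return res
-- ===== Notes on version B (the rewrite author's own statement) =====
-- stated objective: alternative
-- what changed: Replaces the per-letter O(k^2)-memory interval DP table with an O(1)-per-window closed-form gather cost computed from prefix sums of median-normalized positions, enumerating windows (i,j) directly and keeping a running max.
import Mathlib
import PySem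

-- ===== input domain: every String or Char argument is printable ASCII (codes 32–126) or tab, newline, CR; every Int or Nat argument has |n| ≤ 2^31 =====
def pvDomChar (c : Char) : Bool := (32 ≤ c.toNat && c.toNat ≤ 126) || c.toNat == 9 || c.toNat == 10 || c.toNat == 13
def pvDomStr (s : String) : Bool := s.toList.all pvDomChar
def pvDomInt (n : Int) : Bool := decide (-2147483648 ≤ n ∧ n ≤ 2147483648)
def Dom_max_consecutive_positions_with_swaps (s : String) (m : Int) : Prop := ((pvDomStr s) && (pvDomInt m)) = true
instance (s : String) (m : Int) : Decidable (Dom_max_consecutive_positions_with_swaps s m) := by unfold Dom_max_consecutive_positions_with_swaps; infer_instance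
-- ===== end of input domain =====

-- B replaces A's per-letter interval-DP table by a closed-form window gather cost
-- computed from prefix sums of normalized positions (alternative algorithm, O(k)
-- instead of O(k^2) extra memory per letter).

-- ===== PORT A =====
-- dp[i][j] read/write (every access A makes is with indices in range, so getD/set are exact)
def pvGet2 (dp : List (List Int)) (i j : Nat) : Int := (dp.getD i []).getD j 0

def pvSet2 (dp : List (List Int)) (i j : Nat) (v : Int) : List (List Int) :=
  dp.set i ((dp.getD i []).set j v)

-- body of A's inner `for i in range(len(pos) - length + 1)` loop
def pvStepA (pos : List Int) (m : Int) (L : Nat) (st : List (List Int) × Int) (i : Nat) :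
    List (List Int) × Int :=
  let j := i + L - 1
  let v := pvGet2 st.1 (i+1) (j-1) + pos.getD j 0 - pos.getD i 0 + 1 - (L : Int)
  (pvSet2 st.1 i j v, if v ≤ m then (L : Int) else st.2)

-- the per-letter DP block of A (from `ans = 1` through the `length` loop)
def pvAnsA (pos : List Int) (m : Int) : Int :=
  ((List.range' 2 (pos.length - 1)).foldl (fun st L =>
      (List.range (pos.length - L + 1)).foldl (pvStepA pos m L) st)
    (List.replicate pos.length (List.replicate pos.length (0 : Int)), 1)).2

def max_consecutive_positions_with_swaps (s : String) (m : Int) : Int :=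
  ((List.range 26).map (fun t => Char.ofNat (97 + t))).foldl (fun res c =>
    let pos := (PySem.List.enumerate s.toList 0).foldl
      (fun ps p => if c = p.2 then ps ++ [p.1] else ps) ([] : List Int)
    if pos.length < 2 then res
    else max res (pvAnsA pos m)) 1

-- ===== PORT B =====
-- body of B's inner `for j in range(i + 1, k)` loop
def pvStepB (P : List Int) (m : Int) (i : Nat) (best : Int) (j : Nat) : Int :=
  let h := (j - i + 1) / 2
  let cost := (P.getD (j+1) 0 - P.getD (j+1-h) 0) - (P.getD (i+h) 0 - P.getD i 0)
  if cost ≤ m ∧ (j : Int) - (i : Int) + 1 > best then (j : Int) - (i : Int) + 1 else best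

-- per-letter best window length via prefix sums of q[t] = pos[t] - t
def pvBestB (pos : List Int) (m : Int) : Int :=
  (List.range pos.length).foldl (fun best i =>
    (List.range' (i+1) (pos.length - (i+1))).foldl
      (pvStepB ((List.range pos.length).foldl
          (fun P t => P.set (t+1) (P.getD t 0 +
            ((PySem.List.enumerate pos 0).map (fun p => p.2 - p.1)).getD t 0))
          (List.replicate (pos.length + 1) (0 : Int))) m i) best) 1

def max_consecutive_positions_with_swaps_alt (s : String) (m : Int) : Int :=
  "abcdefghijklmnopqrstuvwxyz".toList.foldl (fun res c =>
    let pos := ((PySem.List.enumerate s.toList 0).filter (fun p => p.2 = c)).map (fun p => p.1)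
    max res (pvBestB pos m)) 1

-- ===== PRECONDITION & SPEC =====
def Spec_max_consecutive_positions_with_swaps (s : String) (m : Int) (out : Int) : Prop := out = max_consecutive_positions_with_swaps_alt s m
instance (s : String) (m : Int) (out : Int) : Decidable (Spec_max_consecutive_positions_with_swaps s m out) := by unfold Spec_max_consecutive_positions_with_swaps; infer_instance

-- ===== CLAIM (what is proved, stated in full; the proofs are below) =====
def Claim_equal_max_consecutive_positions_with_swaps : Prop := ∀ (s : String) (m : Int), Dom_max_consecutive_positions_with_swaps s m → Spec_max_consecutive_positions_with_swaps s m (max_consecutive_positions_with_swaps s m)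

-- ===== LEMMAS AND PROOFS =====

-- q[t] = pos[t] - t and its prefix sums
def pvQ (pos : List Int) (t : Nat) : Int := pos.getD t 0 - t

def pvQsum (pos : List Int) (t : Nat) : Int := ((List.range t).map (pvQ pos)).sum

-- the interval gather cost that A's recurrence computes
def pvG (pos : List Int) (i j : Nat) : Int :=
  if i < j then
    pvG pos (i+1) (j-1) + pos.getD j 0 - pos.getD i 0 + 1 - ((j : Int) - (i : Int) + 1)
  else 0
termination_by j - i
decreasing_by omega

lemma pvQsum_succ (pos : List Int) (t : Nat) :
    pvQsum pos (t+1) = pvQsum pos t + pvQ pos t := by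
  simp [pvQsum, List.range_succ]

lemma pvG_eq (pos : List Int) (i j : Nat) (hij : i < j) :
    pvG pos i j = pvG pos (i+1) (j-1) + pvQ pos j - pvQ pos i := by
  rw [pvG, if_pos hij]
  simp only [pvQ]
  ring

lemma pvG_stop (pos : List Int) (i j : Nat) (hij : ¬ i < j) : pvG pos i j = 0 := by
  rw [pvG, if_neg hij]

-- B's closed-form cost equals A's recurrence value
lemma pvCost_eq_G (pos : List Int) : ∀ (n i j : Nat), j - i = n → i < j →
    (pvQsum pos (j+1) - pvQsum pos (j+1 - (j-i+1)/2)) -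
      (pvQsum pos (i + (j-i+1)/2) - pvQsum pos i) = pvG pos i j := by
  intro n
  induction n using Nat.strong_induction_on with
  | _ n ih =>
    intro i j hn hij
    by_cases h1 : j = i + 1
    · subst h1
      have e2 : (i+1) - i + 1 = 2 := by omega
      have eh : ((i+1) - i + 1) / 2 = 1 := by omega
      rw [eh]
      have e3 : i + 1 + 1 - 1 = i + 1 := by omega
      rw [e3, pvQsum_succ pos (i+1), pvQsum_succ pos i]
      rw [pvG_eq pos i (i+1) hij, pvG_stop pos (i+1) (i+1-1) (by omega)]
      ring
    · by_cases h2 : j = i + 2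
      · subst h2
        have eh : ((i+2) - i + 1) / 2 = 1 := by omega
        rw [eh]
        have e3 : i + 2 + 1 - 1 = i + 2 := by omega
        rw [e3, pvQsum_succ pos (i+2), pvQsum_succ pos i]
        rw [pvG_eq pos i (i+2) hij, pvG_stop pos (i+1) (i+2-1) (by omega)]
        ring
      · -- j ≥ i + 3
        have hge : i + 3 ≤ j := by omega
        have hlt : (j-1) - (i+1) < n := by omega
        have hij' : i + 1 < j - 1 := by omega
        have IH := ih ((j-1) - (i+1)) hlt (i+1) (j-1) rfl hij'
        have hh : ((j-1) - (i+1) + 1) / 2 = (j - i + 1) / 2 - 1 := by omega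
        rw [hh] at IH
        have e1 : j - 1 + 1 = j := by omega
        rw [e1] at IH
        have e2 : j - ((j-i+1)/2 - 1) = j + 1 - (j-i+1)/2 := by omega
        have e3 : (i+1) + ((j-i+1)/2 - 1) = i + (j-i+1)/2 := by omega
        rw [e2, e3] at IH
        rw [pvQsum_succ pos i] at IH
        rw [pvQsum_succ pos j]
        rw [pvG_eq pos i j hij, ← IH]
        ring
  
-- abstract forms of the two per-letter computations
def pvAnsAbs (pos : List Int) (m : Int) : Int :=
  (List.range' 2 (pos.length - 1)).foldl (fun a L =>
    if (List.range (pos.length - L + 1)).any (fun i => decide (pvG pos i (i+L-1) ≤ m))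
    then (L : Int) else a) 1

def pvBestAbs (pos : List Int) (m : Int) : Int :=
  (List.range pos.length).foldl (fun b i =>
    (List.range' (i+1) (pos.length - (i+1))).foldl (fun b j =>
      if pvG pos i j ≤ m then max b ((j : Int) - (i : Int) + 1) else b) b) 1

-- ---------- A: the DP table is pvG everywhere it has been filled ----------

def pvTbl (pos : List Int) (L : Nat) : List (List Int) :=
  (List.range pos.length).map (fun i => (List.range pos.length).map (fun j =>
    if i < j ∧ j < i + L then pvG pos i j else 0))

def pvTblP (pos : List Int) (L N : Nat) : List (List Int) :=
  (List.range pos.length).map (fun i => (List.range pos.length).map (fun j =>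
    if i < j ∧ (j + 1 < i + L ∨ (j + 1 = i + L ∧ i < N)) then pvG pos i j else 0))

lemma pvGet2_map (g : Nat → Nat → Int) (k i j : Nat) (hi : i < k) (hj : j < k) :
    pvGet2 ((List.range k).map (fun i => (List.range k).map (fun j => g i j))) i j = g i j := by
  simp [pvGet2, List.getD_eq_getElem?_getD, hi, hj]

lemma pvTblP_zero (pos : List Int) (L : Nat) (hL : 2 ≤ L) :
    pvTbl pos (L - 1) = pvTblP pos L 0 := by
  unfold pvTbl pvTblP
  apply List.ext_getElem (by simp)
  intro i hi1 hi2
  simp only [List.length_map, List.length_range] at hi1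
  simp only [List.getElem_map, List.getElem_range]
  apply List.ext_getElem (by simp)
  intro j hj1 hj2
  simp only [List.length_map, List.length_range] at hj1
  simp only [List.getElem_map, List.getElem_range]
  split_ifs with h1 h2 h2 <;> first | rfl | (exfalso; omega)

lemma pvTblP_full (pos : List Int) (L : Nat) (hL : 2 ≤ L) (hLk : L ≤ pos.length) :
    pvTblP pos L (pos.length - L + 1) = pvTbl pos L := by
  unfold pvTbl pvTblP
  apply List.ext_getElem (by simp)
  intro i hi1 hi2
  simp only [List.length_map, List.length_range] at hi1
  simp only [List.getElem_map, List.getElem_range]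
  apply List.ext_getElem (by simp)
  intro j hj1 hj2
  simp only [List.length_map, List.length_range] at hj1
  simp only [List.getElem_map, List.getElem_range]
  split_ifs with h1 h2 h2 <;> first | rfl | (exfalso; omega)

lemma pvTbl_one (pos : List Int) :
    List.replicate pos.length (List.replicate pos.length (0 : Int)) = pvTbl pos 1 := by
  unfold pvTbl
  apply List.ext_getElem (by simp)
  intro i hi1 hi2
  simp only [List.length_replicate] at hi1
  simp only [List.getElem_map, List.getElem_range, List.getElem_replicate]
  apply List.ext_getElem (by simp)
  intro j hj1 hj2
  simp only [List.length_replicate] at hj1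
  simp only [List.getElem_map, List.getElem_range, List.getElem_replicate]
  split_ifs with h1 <;> first | rfl | (exfalso; omega)

lemma pvInner (pos : List Int) (m : Int) (L : Nat) (hL2 : 2 ≤ L) (hLk : L ≤ pos.length) :
    ∀ N, N ≤ pos.length - L + 1 → ∀ a : Int,
    (List.range N).foldl (pvStepA pos m L) (pvTblP pos L 0, a)
      = (pvTblP pos L N,
         if (List.range N).any (fun i => decide (pvG pos i (i+L-1) ≤ m)) then (L : Int) else a) := by
  intro N
  induction N with
  | zero => intro _ a; simp
  | succ n ih =>
    intro hN a
    rw [List.range_succ, List.foldl_append, ih (by omega) a, List.foldl_cons, List.foldl_nil]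
    have hNk : n + 1 < pos.length := by omega
    have hjk : n + L - 1 < pos.length := by omega
    have hn' : n < pos.length := by omega
    have hj2 : n + L - 1 - 1 < pos.length := by omega
    simp only [pvStepA]
    have hget : pvGet2 (pvTblP pos L n) (n+1) (n + L - 1 - 1) = pvG pos (n+1) (n + L - 1 - 1) := by
      unfold pvTblP
      rw [pvGet2_map (fun i j => if i < j ∧ (j + 1 < i + L ∨ (j + 1 = i + L ∧ i < n))
            then pvG pos i j else 0) pos.length (n+1) (n + L - 1 - 1) hNk hj2]
      by_cases hc : n + 1 < n + L - 1 - 1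
      · rw [if_pos ⟨hc, Or.inl (by omega)⟩]
      · rw [if_neg (by omega), pvG_stop pos _ _ hc]
    have hv : pvGet2 (pvTblP pos L n) (n+1) (n + L - 1 - 1) + pos.getD (n + L - 1) 0
        - pos.getD n 0 + 1 - (L : Int) = pvG pos n (n + L - 1) := by
      rw [hget, pvG_eq pos n (n + L - 1) (by omega)]
      simp only [pvQ]
      have hc : ((n + L - 1 : Nat) : Int) = (n : Int) + (L : Int) - 1 := by omega
      rw [hc]
      ring
    rw [hv]
    have hrow : ((List.range pos.length).map (fun i => (List.range pos.length).map (fun j =>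
          if i < j ∧ (j + 1 < i + L ∨ (j + 1 = i + L ∧ i < n)) then pvG pos i j else 0))).getD n []
        = (List.range pos.length).map (fun j =>
            if n < j ∧ (j + 1 < n + L ∨ (j + 1 = n + L ∧ n < n)) then pvG pos n j else 0) := by
      simp [List.getD_eq_getElem?_getD, hn']
    have hset : pvSet2 (pvTblP pos L n) n (n + L - 1) (pvG pos n (n + L - 1)) = pvTblP pos L (n+1) := by
      unfold pvSet2 pvTblP
      rw [hrow]
      apply List.ext_getElem (by simp)
      intro u hu1 hu2
      simp only [List.length_set, List.length_map, List.length_range] at hu1 hu2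
      rw [List.getElem_set]
      by_cases hun : n = u
      · rw [if_pos hun]
        apply List.ext_getElem (by simp)
        intro w hw1 hw2
        simp only [List.length_set, List.length_map, List.length_range] at hw1 hw2
        rw [List.getElem_set]
        simp only [List.getElem_map, List.getElem_range]
        split_ifs with hA hB hC <;>
          first | rfl | (congr 1 <;> omega) | (exfalso; omega)
      · rw [if_neg hun]
        simp only [List.getElem_map, List.getElem_range]
        apply List.ext_getElem (by simp)
        intro w hw1 hw2
        simp only [List.length_map, List.length_range] at hw1 hw2
        simp only [List.getElem_map, List.getElem_range]
        split_ifs with hA hB <;> first | rfl | (exfalso; omega)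
    rw [hset]
    have hans : (if pvG pos n (n + L - 1) ≤ m then (L : Int)
          else if (List.range n).any (fun i => decide (pvG pos i (i+L-1) ≤ m)) then (L : Int) else a)
        = if (List.range n ++ [n]).any (fun i => decide (pvG pos i (i+L-1) ≤ m)) then (L : Int) else a := by
      rw [List.any_append]
      by_cases hm1 : pvG pos n (n + L - 1) ≤ m <;>
        by_cases hany : (List.range n).any (fun i => decide (pvG pos i (i+L-1) ≤ m)) <;>
          simp [hm1, hany]
    rw [hans]

lemma pvOuter (pos : List Int) (m : Int) :
    ∀ (n L0 : Nat), 2 ≤ L0 → L0 + n ≤ pos.length + 1 → ∀ a : Int,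
    ((List.range' L0 n).foldl (fun st L =>
        (List.range (pos.length - L + 1)).foldl (pvStepA pos m L) st) (pvTbl pos (L0 - 1), a)).2
      = (List.range' L0 n).foldl (fun a L =>
          if (List.range (pos.length - L + 1)).any (fun i => decide (pvG pos i (i+L-1) ≤ m))
          then (L : Int) else a) a := by
  intro n
  induction n with
  | zero => intros; simp
  | succ n ih =>
    intro L0 hL0 hsum a
    rw [List.range'_succ, List.foldl_cons, List.foldl_cons]
    have hL0k : L0 ≤ pos.length := by omega
    have h1 : (List.range (pos.length - L0 + 1)).foldl (pvStepA pos m L0) (pvTbl pos (L0 - 1), a)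
        = (pvTbl pos L0,
           if (List.range (pos.length - L0 + 1)).any (fun i => decide (pvG pos i (i+L0-1) ≤ m))
           then (L0 : Int) else a) := by
      rw [pvTblP_zero pos L0 hL0,
          pvInner pos m L0 hL0 hL0k (pos.length - L0 + 1) (le_refl _) a,
          pvTblP_full pos L0 hL0 hL0k]
    rw [h1]
    have h2 : pvTbl pos L0 = pvTbl pos ((L0 + 1) - 1) := by norm_num
    rw [h2]
    exact ih (L0 + 1) (by omega) (by omega) _

lemma pvAnsA_eq_abs (pos : List Int) (m : Int) : pvAnsA pos m = pvAnsAbs pos m := by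
  unfold pvAnsA pvAnsAbs
  by_cases hk : 2 ≤ pos.length
  · rw [pvTbl_one pos]
    exact pvOuter pos m (pos.length - 1) 2 (le_refl _) (by omega) 1
  · have h0 : pos.length - 1 = 0 := by omega
    rw [h0]
    simp

-- ---------- B: the prefix-sum list and the closed-form cost ----------

lemma pvQ_getD (pos : List Int) (t : Nat) (ht : t < pos.length) :
    ((PySem.List.enumerate pos 0).map (fun p => p.2 - p.1)).getD t 0 = pvQ pos t := by
  rw [List.getD_eq_getElem?_getD, List.getElem?_map, PySem.List.getElem?_enumerate]
  simp [List.getElem?_eq_getElem ht, pvQ, List.getD_eq_getElem?_getD]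

def pvPP (pos : List Int) (N : Nat) : List Int :=
  (List.range (pos.length + 1)).map (fun u => if u ≤ N then pvQsum pos u else 0)

lemma pvP_spec (pos : List Int) : ∀ N, N ≤ pos.length →
    (List.range N).foldl (fun P t =>
        P.set (t+1) (P.getD t 0 + ((PySem.List.enumerate pos 0).map (fun p => p.2 - p.1)).getD t 0))
      (List.replicate (pos.length + 1) (0 : Int)) = pvPP pos N := by
  intro N
  induction N with
  | zero =>
    intro _
    rw [List.range_zero, List.foldl_nil]
    apply List.ext_getElem (by simp [pvPP])
    intro u hu1 hu2
    simp only [List.length_replicate] at hu1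
    simp only [pvPP, List.getElem_replicate, List.getElem_map, List.getElem_range]
    rcases Nat.eq_zero_or_pos u with h | h
    · subst h; simp [pvQsum]
    · rw [if_neg (by omega)]
  | succ n ih =>
    intro hN
    rw [List.range_succ, List.foldl_append, ih (by omega), List.foldl_cons, List.foldl_nil]
    have hq := pvQ_getD pos n (by omega)
    have hPN : (pvPP pos n).getD n 0 = pvQsum pos n := by
      simp [pvPP, List.getD_eq_getElem?_getD, (show n < pos.length + 1 by omega)]
    rw [hq, hPN, ← pvQsum_succ]
    apply List.ext_getElem (by simp [pvPP])
    intro u hu1 hu2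
    have hu3 : u < pos.length + 1 := by simpa [pvPP] using hu2
    rw [List.getElem_set]
    by_cases hA : n + 1 = u
    · rw [if_pos hA]
      simp only [pvPP, List.getElem_map, List.getElem_range]
      rw [if_pos (by omega), hA]
    · rw [if_neg hA]
      simp only [pvPP, List.getElem_map, List.getElem_range]
      by_cases hB : u ≤ n
      · rw [if_pos hB, if_pos (by omega)]
      · rw [if_neg hB, if_neg (by omega)]

lemma pvP_getD (pos : List Int) (u : Nat) (hu : u ≤ pos.length) :
    (pvPP pos pos.length).getD u 0 = pvQsum pos u := by
  simp [pvPP, List.getD_eq_getElem?_getD, (show u < pos.length + 1 by omega), hu]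

lemma pvBestB_eq_abs (pos : List Int) (m : Int) : pvBestB pos m = pvBestAbs pos m := by
  unfold pvBestB pvBestAbs
  simp only [pvP_spec pos pos.length (le_refl _)]
  apply List.foldl_ext
  intro b i hi
  rw [List.mem_range] at hi
  apply List.foldl_ext
  intro b j hj
  rw [List.mem_range'_1] at hj
  have hij : i < j := by omega
  have hjk : j < pos.length := by omega
  simp only [pvStepB]
  have hb1 : j + 1 ≤ pos.length := by omega
  have hb2 : j + 1 - (j - i + 1) / 2 ≤ pos.length := by omega
  have hb3 : i + (j - i + 1) / 2 ≤ pos.length := by omega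
  have hb4 : i ≤ pos.length := by omega
  rw [pvP_getD pos _ hb1, pvP_getD pos _ hb2, pvP_getD pos _ hb3, pvP_getD pos _ hb4,
     pvCost_eq_G pos (j - i) i j rfl hij]
  by_cases hm1 : pvG pos i j ≤ m
  · by_cases hlt : b < (j : Int) - (i : Int) + 1
    · rw [if_pos ⟨hm1, hlt⟩, if_pos hm1, max_eq_right (le_of_lt hlt)]
    · rw [if_neg (fun hcon => hlt hcon.2), if_pos hm1, max_eq_left (not_lt.1 hlt)]
  · rw [if_neg (fun hcon => hm1 hcon.1), if_neg hm1]

-- ---------- the two abstract per-letter results agree ----------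

lemma pvMaxfold_spec {α : Type} (P : α → Prop) [DecidablePred P] (f : α → Int)
    (l : List α) (b0 : Int) :
    b0 ≤ l.foldl (fun b x => if P x then max b (f x) else b) b0 ∧
    (l.foldl (fun b x => if P x then max b (f x) else b) b0 = b0 ∨
      ∃ x ∈ l, P x ∧ l.foldl (fun b x => if P x then max b (f x) else b) b0 = f x) ∧
    ∀ x ∈ l, P x → f x ≤ l.foldl (fun b x => if P x then max b (f x) else b) b0 := by
  induction l generalizing b0 with
  | nil => simp
  | cons hd tl ih =>
    simp only [List.foldl_cons]
    by_cases hp : P hd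
    · rw [if_pos hp]
      obtain ⟨h1, h2, h3⟩ := ih (max b0 (f hd))
      refine ⟨le_trans (le_max_left _ _) h1, ?_, ?_⟩
      · rcases h2 with h2 | ⟨x, hx, hPx, hval⟩
        · rcases max_choice b0 (f hd) with hmx | hmx
          · left; rw [h2, hmx]
          · right; exact ⟨hd, List.mem_cons_self, hp, by rw [h2, hmx]⟩
        · right; exact ⟨x, List.mem_cons_of_mem _ hx, hPx, hval⟩
      · intro x hx hPx
        rcases List.mem_cons.1 hx with rfl | hx'
        · exact le_trans (le_max_right _ _) h1
        · exact h3 x hx' hPx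
    · rw [if_neg hp]
      obtain ⟨h1, h2, h3⟩ := ih b0
      refine ⟨h1, ?_, ?_⟩
      · rcases h2 with h2 | ⟨x, hx, hPx, hval⟩
        · left; exact h2
        · right; exact ⟨x, List.mem_cons_of_mem _ hx, hPx, hval⟩
      · intro x hx hPx
        rcases List.mem_cons.1 hx with rfl | hx'
        · exact absurd hPx hp
        · exact h3 x hx' hPx

lemma pvOverwrite_spec (Q : Nat → Prop) [DecidablePred Q] :
    ∀ (n L0 : Nat) (a0 : Int), a0 ≤ (L0 : Int) →
    a0 ≤ (List.range' L0 n).foldl (fun a L => if Q L then (L : Int) else a) a0 ∧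
    ((List.range' L0 n).foldl (fun a L => if Q L then (L : Int) else a) a0 = a0 ∨
      ∃ L ∈ List.range' L0 n, Q L ∧
        (List.range' L0 n).foldl (fun a L => if Q L then (L : Int) else a) a0 = (L : Int)) ∧
    ∀ L ∈ List.range' L0 n, Q L →
      (L : Int) ≤ (List.range' L0 n).foldl (fun a L => if Q L then (L : Int) else a) a0 := by
  intro n
  induction n with
  | zero => intro L0 a0 h; simp
  | succ n ih =>
    intro L0 a0 h
    rw [List.range'_succ]
    simp only [List.foldl_cons]
    by_cases hq : Q L0
    · rw [if_pos hq]
      obtain ⟨h1, h2, h3⟩ := ih (L0 + 1) (L0 : Int) (by push_cast; omega)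
      refine ⟨le_trans h h1, ?_, ?_⟩
      · rcases h2 with h2 | ⟨L, hL, hQL, hv⟩
        · right; exact ⟨L0, List.mem_cons_self, hq, h2⟩
        · right; exact ⟨L, List.mem_cons_of_mem _ hL, hQL, hv⟩
      · intro L hL hQL
        rcases List.mem_cons.1 hL with rfl | hL'
        · exact h1
        · exact h3 L hL' hQL
    · rw [if_neg hq]
      obtain ⟨h1, h2, h3⟩ := ih (L0 + 1) a0 (by push_cast; omega)
      refine ⟨h1, ?_, ?_⟩
      · rcases h2 with h2 | ⟨L, hL, hQL, hv⟩
        · left; exact h2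
        · right; exact ⟨L, List.mem_cons_of_mem _ hL, hQL, hv⟩
      · intro L hL hQL
        rcases List.mem_cons.1 hL with rfl | hL'
        · exact absurd hQL hq
        · exact h3 L hL' hQL

lemma pvAbs_eq (pos : List Int) (m : Int) : pvAnsAbs pos m = pvBestAbs pos m := by
  have hB : pvBestAbs pos m
      = ((List.range pos.length).flatMap (fun i =>
          (List.range' (i+1) (pos.length - (i+1))).map (fun j => (i, j)))).foldl
        (fun b p => if pvG pos p.1 p.2 ≤ m then max b ((p.2 : Int) - (p.1 : Int) + 1) else b) 1 := by
    rw [List.foldl_flatMap]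
    unfold pvBestAbs
    apply List.foldl_ext
    intro b i _
    rw [List.foldl_map]
  obtain ⟨hB1, hB2, hB3⟩ := pvMaxfold_spec
    (fun p : Nat × Nat => pvG pos p.1 p.2 ≤ m) (fun p => (p.2 : Int) - (p.1 : Int) + 1)
    ((List.range pos.length).flatMap (fun i =>
        (List.range' (i+1) (pos.length - (i+1))).map (fun j => (i, j)))) 1
  obtain ⟨hA1, hA2, hA3⟩ := pvOverwrite_spec
    (fun L => (List.range (pos.length - L + 1)).any (fun i => decide (pvG pos i (i+L-1) ≤ m)) = true)
    (pos.length - 1) 2 1 (by norm_num)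
  have hAdef : pvAnsAbs pos m
      = (List.range' 2 (pos.length - 1)).foldl
          (fun a L => if (List.range (pos.length - L + 1)).any
              (fun i => decide (pvG pos i (i+L-1) ≤ m)) = true then (L : Int) else a) 1 := by
    unfold pvAnsAbs
    apply List.foldl_ext
    intro a L _
    rfl
  rw [hAdef, hB]
  apply le_antisymm
  · rcases hA2 with h | ⟨L, hL, hQ, hv⟩
    · rw [h]; exact hB1
    · rw [List.mem_range'_1] at hL
      rw [List.any_eq_true] at hQ
      obtain ⟨i, hi, hdec⟩ := hQ
      rw [List.mem_range] at hi
      rw [decide_eq_true_iff] at hdec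
      have hmem : ((i, i + L - 1) : Nat × Nat) ∈ (List.range pos.length).flatMap (fun i =>
          (List.range' (i+1) (pos.length - (i+1))).map (fun j => (i, j))) := by
        rw [List.mem_flatMap]
        refine ⟨i, by rw [List.mem_range]; omega, ?_⟩
        rw [List.mem_map]
        exact ⟨i + L - 1, by rw [List.mem_range'_1]; omega, rfl⟩
      have hle := hB3 _ hmem hdec
      rw [hv]
      have hc : ((i + L - 1 : Nat) : Int) - (i : Int) + 1 = (L : Int) := by omega
      rw [hc] at hle
      exact hle
  · rcases hB2 with h | ⟨⟨i, j⟩, hp, hq, hv⟩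
    · rw [h]; exact hA1
    · rw [List.mem_flatMap] at hp
      obtain ⟨i', hi', hmem⟩ := hp
      rw [List.mem_map] at hmem
      obtain ⟨j', hj', hpair⟩ := hmem
      obtain ⟨h₁, h₂⟩ := Prod.mk.inj hpair
      rw [List.mem_range] at hi'
      rw [List.mem_range'_1] at hj'
      have hL : (j - i + 1) ∈ List.range' 2 (pos.length - 1) := by
        rw [List.mem_range'_1]; omega
      have hQL : (List.range (pos.length - (j - i + 1) + 1)).any
          (fun i' => decide (pvG pos i' (i' + (j - i + 1) - 1) ≤ m)) = true := by
        rw [List.any_eq_true]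
        refine ⟨i, by rw [List.mem_range]; omega, ?_⟩
        rw [decide_eq_true_iff]
        have he : i + (j - i + 1) - 1 = j := by omega
        rw [he]
        exact hq
      have hle := hA3 _ hL hQL
      rw [hv]
      have hc : (((j - i + 1) : Nat) : Int) = (j : Int) - (i : Int) + 1 := by omega
      rw [hc] at hle
      exact hle

lemma pvAnsA_eq_bestB (pos : List Int) (m : Int) : pvAnsA pos m = pvBestB pos m := by
  rw [pvAnsA_eq_abs, pvAbs_eq, ← pvBestB_eq_abs]

lemma pvBestB_small (pos : List Int) (m : Int) (h : pos.length < 2) : pvBestB pos m = 1 := by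
  rcases pos with _ | ⟨x, _ | ⟨y, t⟩⟩
  · rfl
  · rfl
  · exfalso; simp at h

-- ===== VERDICT (by name: the statement is the Claim_ definition above) =====
theorem max_consecutive_positions_with_swaps_spec : Claim_equal_max_consecutive_positions_with_swaps := by
  intro s m _hdom
  unfold Spec_max_consecutive_positions_with_swaps
  unfold max_consecutive_positions_with_swaps max_consecutive_positions_with_swaps_alt
  have hletters : ((List.range 26).map (fun t => Char.ofNat (97 + t)))
      = "abcdefghijklmnopqrstuvwxyz".toList := by decide
  rw [hletters]
  suffices H : ∀ (l : List Char) (r : Int), 1 ≤ r →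
      l.foldl (fun res c =>
        let pos := (PySem.List.enumerate s.toList 0).foldl
          (fun ps p => if c = p.2 then ps ++ [p.1] else ps) ([] : List Int)
        if pos.length < 2 then res else max res (pvAnsA pos m)) r
      = l.foldl (fun res c =>
        let pos := ((PySem.List.enumerate s.toList 0).filter (fun p => p.2 = c)).map (fun p => p.1)
        max res (pvBestB pos m)) r by
    exact H _ 1 (le_refl _)
  intro l
  induction l with
  | nil => intro r _; rfl
  | cons c tl ih =>
    intro r hr
    simp only [List.foldl_cons]
    have hpos : (PySem.List.enumerate s.toList 0).foldl
        (fun ps p => if c = p.2 then ps ++ [p.1] else ps) ([] : List Int)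
        = ((PySem.List.enumerate s.toList 0).filter (fun p => p.2 = c)).map (fun p => p.1) := by
      have hfun : (fun (ps : List Int) (p : Int × Char) => if c = p.2 then ps ++ [p.1] else ps)
          = (fun ps p => if (fun (p : Int × Char) => decide (c = p.2)) p = true
              then ps ++ [p.1] else ps) := by
        funext ps p
        simp
      rw [hfun, PySem.List.foldl_append_if, List.nil_append]
      congr 1
      apply List.filter_congr
      intro x _
      simp [eq_comm]
    rw [hpos]
    by_cases hlen : (((PySem.List.enumerate s.toList 0).filter
        (fun p => p.2 = c)).map (fun p => p.1)).length < 2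
    · rw [if_pos hlen, pvBestB_small _ m hlen, max_eq_left hr]
      exact ih r hr
    · rw [if_neg hlen, pvAnsA_eq_bestB]
      exact ih _ (le_trans hr (le_max_left _ _))
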